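-- pv_equiv track=rewrite | github.com/Rajashekarreddy111/Time_Table_ | backend/services/timetable_generator.py | _derive_sessions
-- ===== SOURCE A (Python) =====
-- def _derive_sessions(period_config: list[dict[str, str]]) -> tuple[list[int], list[tuple[int, ...]]]:
--     instructional_periods = []
--     sessions = []
--     current_session = []
--
--     for row in period_config:
--         p = str(row.get("period", "")).strip()
--         if p.isdigit():
--             val = int(p)
--             instructional_periods.append(val)
--             current_session.append(val)
--         else:
--             if current_session:
--                 sessions.append(tuple(current_session))
--                 current_session = []
--     if current_session:
--         sessions.append(tuple(current_session))
--
--     return sorted(list(set(instructional_periods))), sessions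
-- ===== SOURCE B (Python) =====
-- def _parse(row):
--     p = str(row.get("period", "")).strip()
--     return int(p) if p.isdigit() else None
--
--
-- def _runs(vals):
--     # split the Optional-int list into maximal runs of consecutive ints
--     if not vals:
--         return []
--     if vals[0] is None:
--         return _runs(vals[1:])
--     run = []
--     for v in vals:
--         if v is None:
--             break
--         run.append(v)
--     return [tuple(run)] + _runs(vals[len(run):])
--
--
-- def _derive_sessions(period_config):
--     vals = [_parse(row) for row in period_config]
--     nums = sorted({v for v in vals if v is not None})
--     return nums, _runs(vals)
-- ===== Notes on version B (the rewrite author's own statement) =====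
-- stated objective: alternative
-- what changed: A's single loop with a mutable current_session accumulator and an explicit flush branch is replaced by a parse pass (row -> Optional[int]), a set/sorted comprehension for the periods, and a recursive run-splitter that peels maximal non-None runs off the parsed list.
import Mathlib
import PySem

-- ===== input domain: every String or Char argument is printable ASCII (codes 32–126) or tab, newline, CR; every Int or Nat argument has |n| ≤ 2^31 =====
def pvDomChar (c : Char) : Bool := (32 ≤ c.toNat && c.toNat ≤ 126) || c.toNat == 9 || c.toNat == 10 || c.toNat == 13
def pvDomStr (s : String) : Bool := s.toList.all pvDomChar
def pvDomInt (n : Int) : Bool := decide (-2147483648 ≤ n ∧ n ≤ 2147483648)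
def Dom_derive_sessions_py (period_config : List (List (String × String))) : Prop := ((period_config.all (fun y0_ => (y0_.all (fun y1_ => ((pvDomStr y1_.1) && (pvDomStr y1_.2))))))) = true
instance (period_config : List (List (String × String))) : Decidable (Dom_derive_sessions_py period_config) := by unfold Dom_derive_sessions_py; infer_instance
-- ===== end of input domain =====

-- B replaces A's flush-accumulator loop by a parse pass plus recursive run-splitting (objective: alternative, same cost).

-- ===== PORT A =====
-- literal transliteration of A: one fold carrying (instructional_periods, sessions, current_session)
def derive_sessions_py (period_config : List (List (String × String))) : List Int × List (List Int) :=
  let st := period_config.foldl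
    (fun (st : List Int × List (List Int) × List Int) row =>
      let p := PySem.Str.strip ((PySem.Dict.ofList row).getD "period" "")
      if PySem.Str.strIsdigit p then
        let v := (PySem.Int.ofStr? p).getD 0   -- int(p); isdigit guarantees the parse succeeds
        (st.1 ++ [v], st.2.1, st.2.2 ++ [v])
      else
        if st.2.2 ≠ [] then (st.1, st.2.1 ++ [st.2.2], ([] : List Int)) else st)
    ([], [], [])
  let sessions := if st.2.2 ≠ [] then st.2.1 ++ [st.2.2] else st.2.1
  (PySem.List.sorted (PySem.Set.ofList st.1) (fun x => x) false, sessions)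

-- ===== PORT B =====
-- _parse(row)
def pvParseRow (row : List (String × String)) : Option Int :=
  let p := PySem.Str.strip ((PySem.Dict.ofList row).getD "period" "")
  if PySem.Str.strIsdigit p then some ((PySem.Int.ofStr? p).getD 0) else none

-- _runs(vals): maximal runs of consecutive ints (the for/break loop is the takeWhile prefix)
def pvRuns : List (Option Int) → List (List Int)
  | [] => []
  | none :: t => pvRuns t
  | some v :: t =>
      (((some v :: t).takeWhile (fun x => x.isSome)).filterMap (fun x => x)) ::
        pvRuns ((some v :: t).drop ((some v :: t).takeWhile (fun x => x.isSome)).length)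
termination_by l => l.length
decreasing_by
  all_goals simp

def derive_sessions_py_alt (period_config : List (List (String × String))) : List Int × List (List Int) :=
  let vals := period_config.map pvParseRow
  let nums := PySem.List.sorted (PySem.Set.ofList (vals.filterMap (fun v => v))) (fun x => x) false
  (nums, pvRuns vals)

-- ===== PRECONDITION & SPEC =====
def Spec_derive_sessions_py (period_config : List (List (String × String))) (out : List Int × List (List Int)) : Prop := out = derive_sessions_py_alt period_config
instance (period_config : List (List (String × String))) (out : List Int × List (List Int)) : Decidable (Spec_derive_sessions_py period_config out) := by unfold Spec_derive_sessions_py; infer_instance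

-- ===== CLAIM (what is proved, stated in full; the proofs are below) =====
def Claim_equal_derive_sessions_py : Prop := ∀ (period_config : List (List (String × String))), Dom_derive_sessions_py period_config → Spec_derive_sessions_py period_config (derive_sessions_py period_config)

-- ===== LEMMAS AND PROOFS =====

-- A's loop body, abstracted over the parsed value of the row
def pvStep (st : List Int × List (List Int) × List Int) (o : Option Int) :
    List Int × List (List Int) × List Int :=
  match o with
  | some v => (st.1 ++ [v], st.2.1, st.2.2 ++ [v])
  | none => if st.2.2 ≠ [] then (st.1, st.2.1 ++ [st.2.2], ([] : List Int)) else st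

-- A's session construction with an explicit pending run, recursion-style
def pvRunsC (cur : List Int) : List (Option Int) → List (List Int)
  | [] => if cur = [] then [] else [cur]
  | none :: t => if cur = [] then pvRunsC [] t else cur :: pvRunsC [] t
  | some v :: t => pvRunsC (cur ++ [v]) t

theorem pvStep_eq_body :
    (fun (st : List Int × List (List Int) × List Int) (row : List (String × String)) =>
      let p := PySem.Str.strip ((PySem.Dict.ofList row).getD "period" "")
      if PySem.Str.strIsdigit p then
        let v := (PySem.Int.ofStr? p).getD 0
        (st.1 ++ [v], st.2.1, st.2.2 ++ [v])
      else
        if st.2.2 ≠ [] then (st.1, st.2.1 ++ [st.2.2], ([] : List Int)) else st)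
    = fun st row => pvStep st (pvParseRow row) := by
  funext st row
  simp only [pvParseRow, pvStep]
  split <;> simp

theorem pvFold_inv (vals : List (Option Int)) :
    ∀ ips sess cur,
      (vals.foldl pvStep (ips, sess, cur)).1 = ips ++ vals.filterMap (fun v => v) ∧
      (if (vals.foldl pvStep (ips, sess, cur)).2.2 ≠ []
        then (vals.foldl pvStep (ips, sess, cur)).2.1 ++ [(vals.foldl pvStep (ips, sess, cur)).2.2]
        else (vals.foldl pvStep (ips, sess, cur)).2.1)
        = sess ++ pvRunsC cur vals := by
  induction vals with
  | nil =>
      intro ips sess cur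
      simp only [List.foldl_nil, List.filterMap_nil, List.append_nil, pvRunsC]
      refine ⟨by simp, ?_⟩
      by_cases h : cur = [] <;> simp [h]
  | cons o t ih =>
      intro ips sess cur
      cases o with
      | some v =>
          simpa [List.foldl_cons, pvStep, pvRunsC] using ih (ips ++ [v]) sess (cur ++ [v])
      | none =>
          by_cases h : cur = []
          · simpa [List.foldl_cons, pvStep, h, pvRunsC] using ih ips sess []
          · simpa [List.foldl_cons, pvStep, h, pvRunsC] using ih ips (sess ++ [cur]) []

theorem pvRuns_nil : pvRuns [] = [] := by rw [pvRuns.eq_def]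

theorem pvRuns_none (t : List (Option Int)) : pvRuns (none :: t) = pvRuns t := by
  rw [pvRuns.eq_def]

theorem pvRuns_some (v : Int) (t : List (Option Int)) :
    pvRuns (some v :: t) =
      (v :: (t.takeWhile (fun x => x.isSome)).filterMap (fun x => x)) ::
        pvRuns (t.drop (t.takeWhile (fun x => x.isSome)).length) := by
  rw [pvRuns.eq_def]
  simp

theorem pvRunsC_eq (vals : List (Option Int)) :
    ∀ cur, pvRunsC cur vals =
      if cur = [] then pvRuns vals
      else (cur ++ (vals.takeWhile (fun x => x.isSome)).filterMap (fun v => v)) ::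
             pvRuns (vals.drop (vals.takeWhile (fun x => x.isSome)).length) := by
  induction vals with
  | nil =>
      intro cur
      by_cases h : cur = [] <;> simp [pvRunsC, pvRuns_nil, h]
  | cons o t ih =>
      intro cur
      cases o with
      | none =>
          by_cases h : cur = []
          · simp [pvRunsC, h, ih [], pvRuns_none]
          · simp [pvRunsC, h, ih [], pvRuns_none]
      | some v =>
          by_cases h : cur = []
          · rw [pvRunsC, ih (cur ++ [v])]
            simp [h, pvRuns_some]
          · rw [pvRunsC, ih (cur ++ [v])]
            simp [h]

-- ===== VERDICT (by name: the statement is the Claim_ definition above) =====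
theorem derive_sessions_py_spec : Claim_equal_derive_sessions_py := by
  unfold Claim_equal_derive_sessions_py
  intro pc _
  unfold Spec_derive_sessions_py derive_sessions_py derive_sessions_py_alt
  obtain ⟨h1, h2⟩ := pvFold_inv (pc.map pvParseRow) [] [] []
  simp only [List.nil_append] at h1 h2
  simp only [pvStep_eq_body, ← List.foldl_map]
  rw [h1, h2, pvRunsC_eq]
  simp
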